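-- pv_equiv track=rewrite | github.com/AmeetR/structured-long-horizon-reasoning | reasoning_exec/publish/tex_to_pages.py | normalize_math_for_svg
-- ===== SOURCE A (Python) =====
-- def normalize_math_for_svg(math: str) -> str:
--     replacements = {
--         r"\left": "",
--         r"\right": "",
--         r"\;": " ",
--         r"\,": " ",
--         r"\!": "",
--         r"\quad": "    ",
--         r"\qquad": "        ",
--     }
--     normalized = math
--     for old, new in replacements.items():
--         normalized = normalized.replace(old, new)
--     return normalized.strip()
-- ===== SOURCE B (Python) =====
-- _PAIRS = [
--     ("\\left", ""),
--     ("\\right", ""),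
--     ("\\;", " "),
--     ("\\,", " "),
--     ("\\!", ""),
--     ("\\quad", "    "),
--     ("\\qquad", "        "),
-- ]
--
--
-- def _sub(s, old, new):
--     # one explicit left-to-right scan: emit `new` at each match, else copy a char
--     out = []
--     i = 0
--     while i < len(s):
--         if s.startswith(old, i):
--             out.append(new)
--             i += len(old)
--         else:
--             out.append(s[i])
--             i += 1
--     return "".join(out)
--
--
-- def normalize_math_for_svg(math: str) -> str:
--     def go(s, pairs):
--         if not pairs:
--             return s.strip()
--         old, new = pairs[0]
--         return go(_sub(s, old, new), pairs[1:])
--     return go(math, _PAIRS)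
-- ===== Notes on version B (the rewrite author's own statement) =====
-- stated objective: alternative
-- what changed: Replaces the dict of replacements and seven builtin str.replace calls by a hand-rolled left-to-right scanner (startswith at each position, emitting the replacement or copying a char) applied by explicit recursion over a pair table, then strip; same sequential-pass semantics, different mechanism and decomposition.
import Mathlib
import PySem

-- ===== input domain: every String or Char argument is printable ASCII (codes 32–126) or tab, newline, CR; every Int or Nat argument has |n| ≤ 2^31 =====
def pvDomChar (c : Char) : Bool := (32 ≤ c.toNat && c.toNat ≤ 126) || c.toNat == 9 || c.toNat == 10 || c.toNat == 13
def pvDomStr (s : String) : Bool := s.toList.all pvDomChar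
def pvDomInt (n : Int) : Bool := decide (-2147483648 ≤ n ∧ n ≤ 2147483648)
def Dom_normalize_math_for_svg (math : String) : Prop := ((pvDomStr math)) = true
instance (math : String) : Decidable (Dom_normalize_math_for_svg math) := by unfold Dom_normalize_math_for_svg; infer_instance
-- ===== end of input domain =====

-- B replaces the dict + seven builtin str.replace calls by one hand-rolled scanner applied
-- by recursion over the pair table (objective: alternative decomposition, same cost).

-- ===== PORT A =====
-- A: dict of replacements, loop over items applying str.replace, then strip.
def normalize_math_for_svg (math : String) : String :=
  let replacements : PySem.Dict String String :=
    ((((((((PySem.Dict.empty).insert "\\left" "").insert "\\right" "").insert "\\;" " ").insert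
        "\\," " ").insert "\\!" "").insert "\\quad" "    ").insert "\\qquad" "        ")
  let normalized := replacements.items.foldl
    (fun normalized p => PySem.Str.replace normalized p.1 p.2) math
  PySem.Str.strip normalized

-- ===== PORT B =====
-- B helper _sub: explicit left-to-right scan, emitting `new` at each match of `old`.
def pvSub (old new : List Char) : List Char → List Char
  | [] => []
  | c :: t =>
    if old.isPrefixOf (c :: t) then new ++ pvSub old new (t.drop (old.length - 1))
    else c :: pvSub old new t
termination_by l => l.length
decreasing_by
  all_goals simp

def pvPairs : List (List Char × List Char) :=
  [("\\left".toList, []), ("\\right".toList, []), ("\\;".toList, " ".toList),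
   ("\\,".toList, " ".toList), ("\\!".toList, []), ("\\quad".toList, "    ".toList),
   ("\\qquad".toList, "        ".toList)]

-- B's `go`: recursion over the pair table, stripping at the end.
def pvGo (s : List Char) : List (List Char × List Char) → List Char
  | [] => PySem.Chars.strip s
  | (old, new) :: rest => pvGo (pvSub old new s) rest

def normalize_math_for_svg_alt (math : String) : String :=
  String.ofList (pvGo math.toList pvPairs)

-- ===== PRECONDITION & SPEC =====
def Spec_normalize_math_for_svg (math : String) (out : String) : Prop := out = normalize_math_for_svg_alt math
instance (math : String) (out : String) : Decidable (Spec_normalize_math_for_svg math out) := by unfold Spec_normalize_math_for_svg; infer_instance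

-- ===== CLAIM (what is proved, stated in full; the proofs are below) =====
def Claim_equal_normalize_math_for_svg : Prop := ∀ (math : String), Dom_normalize_math_for_svg math → Spec_normalize_math_for_svg math (normalize_math_for_svg math)

-- ===== LEMMAS AND PROOFS =====

-- replace.go with enough fuel is exactly pvSub (for nonempty `old`)
theorem replace_go_eq_pvSub (old new : List Char) (h : old ≠ []) :
    ∀ (fuel : Nat) (l acc : List Char), l.length ≤ fuel →
      PySem.Chars.replace.go old new fuel l acc = acc.reverse ++ pvSub old new l := by
  intro fuel
  induction fuel with
  | zero =>
    intro l acc hl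
    have hnil : l = [] := by cases l <;> simp_all
    subst hnil
    simp [PySem.Chars.replace.go, pvSub]
  | succ n ih =>
    intro l acc hl
    cases l with
    | nil => simp [PySem.Chars.replace.go, pvSub]
    | cons c t =>
      rw [PySem.Chars.replace.go]
      by_cases hp : old.isPrefixOf (c :: t)
      · obtain ⟨k, hk⟩ : ∃ k, old.length = k + 1 := by
          cases old with
          | nil => exact absurd rfl h
          | cons a b => exact ⟨b.length, by simp⟩
        have hdrop : (c :: t).drop old.length = t.drop (old.length - 1) := by
          rw [hk]; simp
        rw [if_pos hp, ih _ _ (by simp [hdrop] at *; omega)]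
        rw [pvSub, if_pos hp, hdrop]
        simp
      · rw [if_neg hp, ih _ _ (by simpa using Nat.le_of_succ_le_succ hl)]
        rw [pvSub, if_neg hp]
        simp

theorem replace_eq_pvSub (s old new : List Char) (h : old ≠ []) :
    PySem.Chars.replace s old new = pvSub old new s := by
  rw [PySem.Chars.replace, if_neg (by simpa using h)]
  simpa using replace_go_eq_pvSub old new h s.length s [] le_rfl

-- ===== VERDICT (by name: the statement is the Claim_ definition above) =====
set_option maxHeartbeats 1000000 in
theorem normalize_math_for_svg_spec : Claim_equal_normalize_math_for_svg := by
  intro math _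
  unfold Spec_normalize_math_for_svg normalize_math_for_svg normalize_math_for_svg_alt
  dsimp only
  have hitems : ((((((((PySem.Dict.empty).insert "\\left" "").insert "\\right" "").insert "\\;" " ").insert
        "\\," " ").insert "\\!" "").insert "\\quad" "    ").insert "\\qquad" "        " :
        PySem.Dict String String).items =
      [("\\left", ""), ("\\right", ""), ("\\;", " "), ("\\,", " "), ("\\!", ""),
       ("\\quad", "    "), ("\\qquad", "        ")] := by decide
  rw [hitems]
  simp only [List.foldl_cons, List.foldl_nil, pvGo, pvPairs, PySem.Str.strip]
  refine congrArg String.ofList ?_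
  refine congrArg PySem.Chars.strip ?_
  simp only [PySem.Str.toList_replace]
  rw [replace_eq_pvSub _ _ _ (by decide), replace_eq_pvSub _ _ _ (by decide),
      replace_eq_pvSub _ _ _ (by decide), replace_eq_pvSub _ _ _ (by decide),
      replace_eq_pvSub _ _ _ (by decide), replace_eq_pvSub _ _ _ (by decide),
      replace_eq_pvSub _ _ _ (by decide)]
  norm_num
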